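-- pv_equiv track=rewrite | github.com/Osg523/coding_practiceOsg | 프로그래머스/0/181867. x 사이의 개수/x 사이의 개수.py | solution
-- ===== SOURCE A (Python) =====
-- def solution(myString):
--     answer = []
--     l = 0
--     for i, x in enumerate(myString):
--         if x == 'x':
--             answer.append(len(myString[l:i]))
--             l = i+1
--     answer.append(len(myString[l:]))
--     return answer
-- ===== SOURCE B (Python) =====
-- def solution(myString):
--     positions = [i for i, c in enumerate(myString) if c == 'x']
--     bounds = [-1] + positions + [len(myString)]
--     return [b - a - 1 for a, b in zip(bounds, bounds[1:])]
-- ===== Notes on version B (the rewrite author's own statement) =====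
-- stated objective: alternative
-- what changed: B first collects every delimiter index into a boundary list (-1, positions, string length) and emits the answer as consecutive boundary differences minus one, instead of A's single loop that slices the string at each delimiter while carrying a running left pointer.
import Mathlib
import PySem

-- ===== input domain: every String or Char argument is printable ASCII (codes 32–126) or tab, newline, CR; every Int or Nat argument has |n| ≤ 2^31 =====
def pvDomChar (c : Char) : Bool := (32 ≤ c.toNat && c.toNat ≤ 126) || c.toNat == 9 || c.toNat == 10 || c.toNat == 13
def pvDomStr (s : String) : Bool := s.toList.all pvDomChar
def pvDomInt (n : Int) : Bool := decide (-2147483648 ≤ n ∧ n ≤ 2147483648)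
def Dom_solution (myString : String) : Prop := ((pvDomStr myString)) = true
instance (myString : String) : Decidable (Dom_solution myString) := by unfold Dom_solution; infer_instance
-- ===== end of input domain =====

-- B replaces A's slice-as-you-go loop by collecting the 'x' positions and taking
-- consecutive boundary differences; same cost, different decomposition.

-- ===== PORT A =====
-- for i, x in enumerate(myString): if x == 'x': answer.append(len(myString[l:i])); l = i+1
def solution (myString : String) : List Int :=
  let cs := myString.toList
  let st := (PySem.List.enumerate cs 0).foldl
    (fun (st : List Int × Int) (p : Int × Char) =>
      if p.2 = 'x' then
        (st.1 ++ [((PySem.List.slice cs (some st.2) (some p.1)).length : Int)], p.1 + 1)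
      else st) ([], 0)
  st.1 ++ [((PySem.List.slice cs (some st.2) none).length : Int)]

-- ===== PORT B =====
-- positions = [i for i, c in enumerate(myString) if c == 'x']
-- bounds = [-1] + positions + [len(myString)]
-- return [b - a - 1 for a, b in zip(bounds, bounds[1:])]
def solution_alt (myString : String) : List Int :=
  let cs := myString.toList
  let positions := ((PySem.List.enumerate cs 0).filter (fun p => p.2 = 'x')).map (fun p => p.1)
  let bounds : List Int := [-1] ++ positions ++ [(cs.length : Int)]
  (bounds.zip (bounds.drop 1)).map (fun p => p.2 - p.1 - 1)

-- ===== PRECONDITION & SPEC =====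
def Spec_solution (myString : String) (out : List Int) : Prop := out = solution_alt myString
instance (myString : String) (out : List Int) : Decidable (Spec_solution myString out) := by unfold Spec_solution; infer_instance

-- ===== CLAIM (what is proved, stated in full; the proofs are below) =====
def Claim_equal_solution : Prop := ∀ (myString : String), Dom_solution myString → Spec_solution myString (solution myString)

-- ===== LEMMAS AND PROOFS =====

-- proof-only helpers
def posFrom : List Char → Nat → List Int
  | [], _ => []
  | c :: t, s => if c = 'x' then (s : Int) :: posFrom t (s+1) else posFrom t (s+1)

def diffs : Int → List Int → List Int
  | _, [] => []
  | prev, b :: bs => (b - prev - 1) :: diffs b bs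

def lastb : Int → List Int → Int
  | prev, [] => prev
  | _, b :: bs => lastb b bs

def eN : List Char → Nat → Nat → Nat
  | [], _, l => l
  | c :: t, s, l => if c = 'x' then eN t (s+1) (s+1) else eN t (s+1) l

theorem zip_map_diffs (bs : List Int) (prev : Int) :
    (((prev :: bs).zip bs).map (fun p => p.2 - p.1 - 1)) = diffs prev bs := by
  induction bs generalizing prev with
  | nil => simp [diffs]
  | cons b bs ih => simp [diffs, ih b]

theorem positions_eq (t : List Char) (s : Nat) :
    ((PySem.List.enumerate t (s : Int)).filter (fun p => p.2 = 'x')).map (fun p => p.1)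
      = posFrom t s := by
  induction t generalizing s with
  | nil => simp [PySem.List.enumerate_nil, posFrom]
  | cons c t ih =>
    have h1 : ((s : Int) + 1) = ((s + 1 : Nat) : Int) := by push_cast; ring
    rw [PySem.List.enumerate_cons, h1]
    by_cases hc : c = 'x' <;> simp [hc, posFrom] <;> (rw [h1]; exact ih (s+1))

theorem zip_drop_diffs (bs : List Int) (prev : Int) :
    (((prev :: bs)).zip (List.drop 1 (prev :: bs))).map (fun p => p.2 - p.1 - 1)
      = diffs prev bs := by
  simpa using zip_map_diffs bs prev

theorem diffs_append (ps : List Int) (prev x : Int) :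
    diffs prev (ps ++ [x]) = diffs prev ps ++ [x - lastb prev ps - 1] := by
  induction ps generalizing prev with
  | nil => simp [diffs, lastb]
  | cons b bs ih => simp [diffs, lastb, ih b]

theorem eN_eq_lastb (t : List Char) (s l : Nat) :
    (eN t s l : Int) = lastb ((l : Int) - 1) (posFrom t s) + 1 := by
  induction t generalizing s l with
  | nil => simp [eN, posFrom, lastb]
  | cons c t ih =>
    by_cases hc : c = 'x'
    · have e2 : ((s + 1 : Nat) : Int) - 1 = (s : Int) := by push_cast; ring
      simp only [eN, posFrom, hc, if_true, lastb, ih (s+1) (s+1), e2]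
    · simp only [eN, posFrom, hc, if_false, ih (s+1) l]

theorem eN_le (t : List Char) (s l : Nat) (h : l ≤ s) : eN t s l ≤ s + t.length := by
  induction t generalizing s l with
  | nil => simpa [eN] using h
  | cons c t ih =>
    by_cases hc : c = 'x' <;> simp only [eN, hc, if_true, if_false, List.length_cons]
    · have := ih (s+1) (s+1) (le_refl _); omega
    · have := ih (s+1) l (by omega); omega

theorem fold_main (cs : List Char) (t : List Char) (s l : Nat) (ans : List Int)
    (hls : l ≤ s) (hn : s + t.length = cs.length) :
    (PySem.List.enumerate t (s : Int)).foldl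
      (fun (st : List Int × Int) (p : Int × Char) =>
        if p.2 = 'x' then
          (st.1 ++ [((PySem.List.slice cs (some st.2) (some p.1)).length : Int)], p.1 + 1)
        else st) (ans, (l : Int))
      = (ans ++ diffs ((l : Int) - 1) (posFrom t s), ((eN t s l : Nat) : Int)) := by
  induction t generalizing s l ans with
  | nil => simp [PySem.List.enumerate_nil, posFrom, diffs, eN]
  | cons c t ih =>
    rw [PySem.List.enumerate_cons, List.foldl_cons]
    have hn' : (s + 1) + t.length = cs.length := by
      simp only [List.length_cons] at hn; omega
    have h1 : ((s : Int) + 1) = ((s + 1 : Nat) : Int) := by push_cast; ring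
    by_cases hc : c = 'x'
    · have hslice : (PySem.List.slice cs (some (l : Int)) (some (s : Int))).length = s - l := by
        rw [PySem.List.slice_natCast]
        simp only [List.length_take, List.length_drop]
        omega
      simp only [hc, if_true, hslice, h1]
      rw [ih (s+1) (s+1) _ (le_refl _) hn']
      have e1 : ((s - l : Nat) : Int) = (s : Int) - l := by
        rw [Nat.cast_sub hls]
      have e2 : ((s + 1 : Nat) : Int) - 1 = (s : Int) := by push_cast; ring
      have e3 : (s : Int) - ((l : Int) - 1) - 1 = (s : Int) - l := by ring
      simp only [posFrom, eN, if_true, diffs, e1, e2, e3, List.append_assoc,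
        List.singleton_append]
    · simp only [hc, if_false, h1]
      rw [ih (s+1) l _ (by omega) hn']
      simp only [posFrom, eN, hc, if_false]

-- ===== VERDICT (by name: the statement is the Claim_ definition above) =====
theorem solution_spec : Claim_equal_solution := by
  intro myString _
  unfold Spec_solution
  simp only [solution, solution_alt]
  have hmain := fold_main myString.toList myString.toList 0 0 [] (le_refl _) (by simp)
  have hpos := positions_eq myString.toList 0
  have hel := eN_eq_lastb myString.toList 0 0
  simp only [Int.natCast_zero, zero_sub, List.nil_append] at hmain hpos hel
  have hle : eN myString.toList 0 0 ≤ myString.toList.length := by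
    simpa using eN_le myString.toList 0 0 (le_refl _)
  have hsl : (PySem.List.slice myString.toList
        (some ((eN myString.toList 0 0 : Nat) : Int)) none).length
      = myString.toList.length - eN myString.toList 0 0 := by
    rw [PySem.List.slice_from_natCast]
    simp [List.length_drop]
  have hfin : ((myString.toList.length - eN myString.toList 0 0 : Nat) : Int)
      = (myString.toList.length : Int) - lastb (-1) (posFrom myString.toList 0) - 1 := by
    rw [Nat.cast_sub hle, hel]; ring
  rw [hmain, hpos]
  simp only [List.nil_append, List.cons_append]
  rw [zip_drop_diffs, diffs_append, hsl, hfin]
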